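-- pv_equiv track=rewrite | github.com/danielconte/appClasses | app.py | regra2
-- ===== SOURCE A (Python) =====
-- def regra2(textoP): #nomes seguidos viram atributos
--     texto = []
--     for frase in textoP:
--         novaFrase = []
--         aux = ""
--         for palavra in frase:
--             if palavra[2]=="C" and aux =="":
--                 aux = "C"
--             else:
--                 if palavra[2]=="C" and (aux=="C" or aux=="A"):
--                     aux = "A"
--                 else:
--                     aux = ""
--             novaFrase.append([palavra[0],palavra[1],aux])
--         texto.append(novaFrase)
--     return texto
-- ===== SOURCE B (Python) =====
-- def regra2(textoP):  # nomes seguidos viram atributos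
--     def tag(palavra, prev_was_C):
--         if palavra[2] != "C":
--             return ""
--         return "A" if prev_was_C else "C"
--     texto = []
--     for frase in textoP:
--         prevC = [False] + [p[2] == "C" for p in frase]
--         texto.append([[p[0], p[1], tag(p, pc)] for p, pc in zip(frase, prevC)])
--     return texto
-- ===== Notes on version B (the rewrite author's own statement) =====
-- stated objective: simpler
-- what changed: Replaces the threaded aux state machine (whose value feeds the next iteration) with a stateless per-word computation: each tag is decided from the pair (current word, was the previous word a 'C'), obtained by zipping the sentence with its shifted C-flags.
import Mathlib
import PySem

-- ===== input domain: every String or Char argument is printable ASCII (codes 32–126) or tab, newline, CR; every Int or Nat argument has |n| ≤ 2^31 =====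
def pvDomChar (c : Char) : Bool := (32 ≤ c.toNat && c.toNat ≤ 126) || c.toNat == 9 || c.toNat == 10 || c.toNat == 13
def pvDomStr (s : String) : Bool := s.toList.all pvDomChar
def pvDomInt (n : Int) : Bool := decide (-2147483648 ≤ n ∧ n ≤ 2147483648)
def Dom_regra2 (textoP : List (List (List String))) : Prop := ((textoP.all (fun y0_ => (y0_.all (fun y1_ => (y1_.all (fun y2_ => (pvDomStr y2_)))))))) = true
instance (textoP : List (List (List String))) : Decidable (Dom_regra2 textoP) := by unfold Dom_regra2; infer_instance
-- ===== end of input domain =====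

-- B replaces A's threaded `aux` state machine with a stateless tag computed from each
-- word and its predecessor's C-flag (zip with shifted flags); same cost, plainer.

-- ===== PORT A =====
-- inner-loop body: one iteration of 'for palavra in frase' threading (aux, novaFrase);
-- pyGetD is total, exact under Pre_ (every word has >= 3 fields)
def regra2Step (st : String × List (List String)) (palavra : List String) : String × List (List String) :=
  let aux :=
    if PySem.List.pyGetD palavra 2 "" == "C" && st.1 == "" then "C"
    else if PySem.List.pyGetD palavra 2 "" == "C" && (st.1 == "C" || st.1 == "A") then "A"
    else ""
  (aux, st.2 ++ [[PySem.List.pyGetD palavra 0 "", PySem.List.pyGetD palavra 1 "", aux]])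

def regra2 (textoP : List (List (List String))) : List (List (List String)) :=
  textoP.foldl (fun texto frase => texto ++ [(frase.foldl regra2Step ("", [])).2]) []

-- ===== PORT B =====
def regra2Tag (palavra : List String) (prevWasC : Bool) : String :=
  if PySem.List.pyGetD palavra 2 "" != "C" then ""
  else if prevWasC then "A" else "C"

def regra2_alt (textoP : List (List (List String))) : List (List (List String)) :=
  textoP.map (fun frase =>
    let prevC : List Bool := false :: frase.map (fun p => PySem.List.pyGetD p 2 "" == "C")
    (frase.zip prevC).map (fun pc =>
      [PySem.List.pyGetD pc.1 0 "", PySem.List.pyGetD pc.1 1 "", regra2Tag pc.1 pc.2]))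

-- ===== PRECONDITION & SPEC =====
-- A indexes palavra[0], palavra[1], palavra[2]: Pre_ admits exactly the inputs where every word has ≥ 3 fields (else Python raises IndexError)
def Pre_regra2 (textoP : List (List (List String))) : Prop :=
  ∀ frase ∈ textoP, ∀ palavra ∈ frase, 3 ≤ palavra.length
instance (textoP : List (List (List String))) : Decidable (Pre_regra2 textoP) := by unfold Pre_regra2; infer_instance

def pvWitness_regra2 : List (List (List String)) :=
  [[["o", "DET", ""], ["Joao", "N", "C"], ["Silva", "N", "C"]], []]

def Spec_regra2 (textoP : List (List (List String))) (out : List (List (List String))) : Prop := out = regra2_alt textoP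
instance (textoP : List (List (List String))) (out : List (List (List String))) : Decidable (Spec_regra2 textoP out) := by unfold Spec_regra2; infer_instance

-- ===== CLAIM (what is proved, stated in full; the proofs are below) =====
def Claim_equal_regra2 : Prop := ∀ (textoP : List (List (List String))), Dom_regra2 textoP → Pre_regra2 textoP → Spec_regra2 textoP (regra2 textoP)

-- ===== LEMMAS AND PROOFS =====

-- inner-loop invariant: A's fold with state (aux, acc) equals B's zip-map, provided
-- aux ∈ {"", "C", "A"} and (aux ≠ "") mirrors the incoming prev-flag pc.
lemma regra2_loop_eq (frase : List (List String)) (aux : String) (acc : List (List String)) (pc : Bool)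
    (hpc : (aux == "") = !pc) (hset : aux = "" ∨ aux = "C" ∨ aux = "A") :
    (frase.foldl regra2Step (aux, acc)).2
    = acc ++ (frase.zip (pc :: frase.map (fun p => PySem.List.pyGetD p 2 "" == "C"))).map
        (fun x => [PySem.List.pyGetD x.1 0 "", PySem.List.pyGetD x.1 1 "", regra2Tag x.1 x.2]) := by
  induction frase generalizing aux acc pc with
  | nil => simp
  | cons p rest ih =>
    rw [List.foldl_cons, List.zip_cons_cons, List.map_cons]
    by_cases hc : PySem.List.pyGetD p 2 "" = "C"
    · cases pc with
      | false =>
        have ha : aux = "" := by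
          rcases hset with h | h | h <;> simp [h] at hpc ⊢
        subst ha
        have hstep : regra2Step ("", acc) p
            = ("C", acc ++ [[PySem.List.pyGetD p 0 "", PySem.List.pyGetD p 1 "", "C"]]) := by
          simp [regra2Step, hc]
        rw [hstep, ih "C" _ true (by decide) (by simp)]
        simp [regra2Tag, hc]
      | true =>
        have ha : aux = "C" ∨ aux = "A" := by
          rcases hset with h | h | h <;> simp [h] at hpc ⊢
        have hstep : regra2Step (aux, acc) p
            = ("A", acc ++ [[PySem.List.pyGetD p 0 "", PySem.List.pyGetD p 1 "", "A"]]) := by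
          rcases ha with h | h <;> subst h <;> simp [regra2Step, hc]
        rw [hstep, ih "A" _ true (by decide) (by simp)]
        simp [regra2Tag, hc]
    · have hstep : regra2Step (aux, acc) p
          = ("", acc ++ [[PySem.List.pyGetD p 0 "", PySem.List.pyGetD p 1 "", ""]]) := by
        simp [regra2Step, hc]
      have hb : (PySem.List.pyGetD p 2 "" == "C") = false := by simp [hc]
      rw [hstep, List.map_cons, hb, ih "" _ false (by decide) (by simp)]
      simp [regra2Tag, hc]

-- ===== VERDICT (by name: the statement is the Claim_ definition above) =====
theorem regra2_spec : Claim_equal_regra2 := by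
  intro textoP _ _
  unfold Spec_regra2 regra2 regra2_alt
  rw [PySem.List.foldl_append_singleton_eq_map]
  refine List.map_congr_left (fun frase _ => ?_)
  simpa using regra2_loop_eq frase "" [] false (by decide) (Or.inl rfl)
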